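-- pv_equiv track=rewrite | github.com/benny-lo/network-modeling-Fall2023 | Assignment2/task1.py | toggle_edge
-- ===== SOURCE A (Python) =====
-- def toggle_edge(edge_list, edge):
--     if edge[0] == edge[1]:
--         return edge_list
--     if edge in edge_list:
--         popped_edge_list = [x for x in edge_list if x != edge]
--         return popped_edge_list
--     else:
--         return edge_list + [edge]
-- ===== SOURCE B (Python) =====
-- def toggle_edge(edge_list, edge):
--     if edge[0] == edge[1]:
--         return edge_list
--     c = edge_list.count(edge)
--     if c == 0:
--         return edge_list + [edge]
--     res = list(edge_list)
--     for _ in range(c):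
--         res.remove(edge)
--     return res
-- ===== Notes on version B (the rewrite author's own statement) =====
-- stated objective: alternative
-- what changed: Replaces A's membership test plus filtering comprehension with counting the edge's occurrences and deleting them one at a time with repeated list.remove on a copy; the absent case appends as before.
import Mathlib
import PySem

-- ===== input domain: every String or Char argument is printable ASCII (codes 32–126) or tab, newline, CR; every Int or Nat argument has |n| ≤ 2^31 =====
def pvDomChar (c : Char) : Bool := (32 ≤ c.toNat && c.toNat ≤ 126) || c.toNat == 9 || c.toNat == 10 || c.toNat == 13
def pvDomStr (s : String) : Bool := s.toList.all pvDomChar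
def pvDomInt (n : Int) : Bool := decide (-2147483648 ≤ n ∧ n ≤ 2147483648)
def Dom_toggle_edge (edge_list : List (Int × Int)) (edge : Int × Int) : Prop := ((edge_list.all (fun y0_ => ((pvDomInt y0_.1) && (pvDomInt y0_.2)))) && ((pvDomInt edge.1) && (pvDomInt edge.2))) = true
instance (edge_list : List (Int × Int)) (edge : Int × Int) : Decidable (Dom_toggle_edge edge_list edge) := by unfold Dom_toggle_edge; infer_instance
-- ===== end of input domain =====

-- B replaces A's membership test + filtering comprehension with count + repeated list.remove
-- on a copy (deletion of each occurrence in turn); alternative mechanism, same result.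

-- ===== PORT A =====
def toggle_edge (edge_list : List (Int × Int)) (edge : Int × Int) : List (Int × Int) :=
  if edge.1 = edge.2 then edge_list
  else if edge ∈ edge_list then
    edge_list.filter (fun x => x ≠ edge)
  else
    edge_list ++ [edge]

-- ===== PORT B =====
-- the loop 'for _ in range(n): res.remove(edge)';  res.remove never raises here because
-- B only runs it n = count times (the '.getD r' branch is unreachable on such calls).
def pvRemoveN (e : Int × Int) : Nat → List (Int × Int) → List (Int × Int)
  | 0, r => r
  | n + 1, r => pvRemoveN e n ((PySem.List.remove? r e).getD r)

def toggle_edge_alt (edge_list : List (Int × Int)) (edge : Int × Int) : List (Int × Int) :=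
  if edge.1 = edge.2 then edge_list
  else
    let c := PySem.List.count edge_list edge
    if c = 0 then edge_list ++ [edge]
    else pvRemoveN edge c edge_list

-- ===== PRECONDITION & SPEC =====
def Spec_toggle_edge (edge_list : List (Int × Int)) (edge : Int × Int) (out : List (Int × Int)) : Prop := out = toggle_edge_alt edge_list edge
instance (edge_list : List (Int × Int)) (edge : Int × Int) (out : List (Int × Int)) : Decidable (Spec_toggle_edge edge_list edge out) := by unfold Spec_toggle_edge; infer_instance

-- ===== CLAIM (what is proved, stated in full; the proofs are below) =====
def Claim_equal_toggle_edge : Prop := ∀ (edge_list : List (Int × Int)) (edge : Int × Int), Dom_toggle_edge edge_list edge → Spec_toggle_edge edge_list edge (toggle_edge edge_list edge)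

-- ===== LEMMAS AND PROOFS =====

-- removing the first occurrence 'count' times removes exactly all occurrences
theorem pvRemoveN_head (e a : Int × Int) (h : a ≠ e) :
    ∀ (m : Nat) (u : List (Int × Int)), m ≤ u.count e →
      pvRemoveN e m (a :: u) = a :: pvRemoveN e m u := by
  intro m
  induction m with
  | zero => intro u _; rfl
  | succ k ihk =>
    intro u hcnt
    have hmem : e ∈ u := by
      by_contra hno
      simp [List.count_eq_zero.mpr hno] at hcnt
    have hw := PySem.List.remove?_eq_some_erase u e hmem
    have hwcnt : k ≤ (u.erase e).count e := by
      have h2 : (u.erase e).count e = u.count e - 1 :=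
        List.count_erase_self (a := e) (l := u)
      omega
    simp only [pvRemoveN, PySem.List.remove?_cons_of_ne _ h, hw, Option.map_some,
      Option.getD_some]
    exact ihk (u.erase e) hwcnt

theorem pvRemoveN_count (e : Int × Int) : ∀ l : List (Int × Int),
    pvRemoveN e (l.count e) l = l.filter (fun x => x ≠ e) := by
  intro l
  induction l with
  | nil => simp [pvRemoveN]
  | cons a t ih =>
    by_cases h : a = e
    · subst h
      simp [List.count_cons_self, pvRemoveN, PySem.List.remove?_cons_self, ih]
    · rw [List.count_cons_of_ne h]
      by_cases hm : e ∈ t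
      · have hw := PySem.List.remove?_eq_some_erase t e hm
        have hc1 : (t.erase e).count e = t.count e - 1 :=
          List.count_erase_self (a := e) (l := t)
        have hcpos : t.count e ≠ 0 := by
          simpa [List.count_eq_zero] using hm
        obtain ⟨n, hn⟩ := Nat.exists_eq_succ_of_ne_zero hcpos
        rw [hn]
        have hrem : PySem.List.remove? (a :: t) e = some (a :: t.erase e) := by
          rw [PySem.List.remove?_cons_of_ne t h, hw]; rfl
        have h1 : pvRemoveN e (n + 1) (a :: t)
            = pvRemoveN e n ((PySem.List.remove? (a :: t) e).getD (a :: t)) := rfl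
        rw [h1, hrem, Option.getD_some]
        rw [pvRemoveN_head e a h n (t.erase e) (by omega)]
        have hiht : pvRemoveN e n (t.erase e) = t.filter (fun x => x ≠ e) := by
          have h2 : pvRemoveN e (n + 1) t
              = pvRemoveN e n ((PySem.List.remove? t e).getD t) := rfl
          rw [hn, h2, hw, Option.getD_some] at ih
          exact ih
        rw [hiht]
        simp [h]
      · have hc0 : t.count e = 0 := List.count_eq_zero.mpr hm
        rw [hc0]
        show (a :: t) = (a :: t).filter (fun x => x ≠ e)
        refine (List.filter_eq_self.mpr ?_).symm
        intro x hx
        simp only [List.mem_cons] at hx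
        rcases hx with rfl | hx
        · simpa using h
        · simp only [ne_eq, decide_eq_true_eq]
          rintro rfl; exact hm hx

-- ===== VERDICT =====
theorem toggle_edge_spec : Claim_equal_toggle_edge := by
  intro el e _
  unfold Spec_toggle_edge toggle_edge toggle_edge_alt
  by_cases h1 : e.1 = e.2
  · simp [h1]
  · simp only [h1, if_false]
    by_cases hm : e ∈ el
    · have hc : ¬ List.count e el = 0 := by
        simpa [List.count_eq_zero] using hm
      simp only [hm, if_true, PySem.List.count_eq, hc, if_false]
      exact (pvRemoveN_count e el).symm
    · have hc : List.count e el = 0 := List.count_eq_zero.mpr hm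
      simp [hm, PySem.List.count_eq, hc]
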